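-- pv_equiv track=rewrite | github.com/day50-dev/acli | cb/cli_tool/main.py | parse_keystrokes
-- ===== SOURCE A (Python) =====
-- from typing import Optional, List, Tuple
--
-- def parse_keystrokes(keystrokes: str) -> List[str]:
--     """
--     Parse keystroke string into individual keys.
--
--     Handles:
--     - ^X -> Ctrl+X
--     - \n -> Enter
--     - \t -> Tab
--     - Regular characters
--     """
--     keys = []
--     i = 0
--     while i < len(keystrokes):
--         if keystrokes[i] == '^' and i + 1 < len(keystrokes):
--             # Ctrl+key
--             next_char = keystrokes[i + 1].lower()
--             keys.append(f'C-{next_char}')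
--             i += 2
--         elif keystrokes[i] == '\\':
--             # Escape sequence
--             if i + 1 < len(keystrokes):
--                 next_char = keystrokes[i + 1]
--                 if next_char == 'n':
--                     keys.append('Enter')
--                 elif next_char == 't':
--                     keys.append('Tab')
--                 elif next_char == '\\':
--                     keys.append('\\')
--                 i += 2
--             else:
--                 keys.append(keystrokes[i])
--                 i += 1
--         else:
--             keys.append(keystrokes[i])
--             i += 1
--
--     return keys
-- ===== SOURCE B (Python) =====
-- import re
--
-- _TOK = re.compile(r'\^(.)|\\([nt\\])|\\.|\\|(.)', re.DOTALL)
-- _ESC = {'n': 'Enter', 't': 'Tab', '\\': '\\'}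
--
-- def parse_keystrokes(keystrokes: str):
--     keys = []
--     for m in _TOK.finditer(keystrokes):
--         if m.group(1) is not None:
--             keys.append('C-' + m.group(1).lower())
--         elif m.group(2) is not None:
--             keys.append(_ESC[m.group(2)])
--         elif m.group(3) is not None:
--             keys.append(m.group(3))
--         elif m.group(0) == '\\':
--             keys.append('\\')
--         # unknown escape \x: no token
--     return keys
-- ===== Notes on version B (the rewrite author's own statement) =====
-- stated objective: idiomatic
-- what changed: Replaced the hand-written index-and-branch while loop with a compiled regex alternation tokenizer iterated via re.finditer, mapping each matched group to its token.
import Mathlib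
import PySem

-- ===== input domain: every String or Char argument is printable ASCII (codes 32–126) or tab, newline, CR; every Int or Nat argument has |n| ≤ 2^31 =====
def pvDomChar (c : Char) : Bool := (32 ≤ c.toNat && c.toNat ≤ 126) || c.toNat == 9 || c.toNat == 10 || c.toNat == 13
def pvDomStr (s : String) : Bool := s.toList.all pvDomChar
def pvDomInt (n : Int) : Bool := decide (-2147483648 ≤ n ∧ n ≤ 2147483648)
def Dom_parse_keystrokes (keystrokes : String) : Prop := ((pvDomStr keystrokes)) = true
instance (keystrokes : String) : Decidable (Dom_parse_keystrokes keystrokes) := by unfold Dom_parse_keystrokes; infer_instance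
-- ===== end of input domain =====

-- B re-implements the keystroke parser as a regex tokenizer (idiomatic single alternation, same cost).


-- ===== PORT A =====
-- index-based while loop of A, transliterated (cs = keystrokes as a char list, i the index)
def pkALoop (cs : List Char) (i : Nat) (keys : List String) : List String :=
  if _h : i < cs.length then
    let c := cs.getD i ' '
    if c = '^' ∧ i + 1 < cs.length then
      pkALoop cs (i + 2) (keys ++ ["C-" ++ (cs.getD (i + 1) ' ').toLower.toString])
    else if c = '\\' then
      if i + 1 < cs.length then
        let nc := cs.getD (i + 1) ' '
        let keys' :=
          if nc = 'n' then keys ++ ["Enter"]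
          else if nc = 't' then keys ++ ["Tab"]
          else if nc = '\\' then keys ++ ["\\"]
          else keys
        pkALoop cs (i + 2) keys'
      else
        pkALoop cs (i + 1) (keys ++ [c.toString])
    else
      pkALoop cs (i + 1) (keys ++ [c.toString])
  else keys
termination_by cs.length - i

def parse_keystrokes (keystrokes : String) : List String :=
  pkALoop keystrokes.toList 0 []

-- ===== PORT B =====
-- B's regex alternation r'\^(.)|\\([nt\\])|\\.|\\|(.)' ported as a scanner trying
-- the branches in the same order at each match position (exact for this regex).
def pkTok : List Char → List String
  | [] => []
  | a :: rest =>
    if a = '^' then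
      match rest with
      | b :: rest' => ("C-" ++ b.toLower.toString) :: pkTok rest'   -- branch \^(.)
      | [] => ["^"]                                                  -- catch-all (.)
    else if a = '\\' then
      match rest with
      | b :: rest' =>
        if b = 'n' then "Enter" :: pkTok rest'                       -- branch \\([nt\\])
        else if b = 't' then "Tab" :: pkTok rest'
        else if b = '\\' then "\\" :: pkTok rest'
        else pkTok rest'                                             -- branch \\. : no token
      | [] => ["\\"]                                                 -- branch \\ (lone)
    else a.toString :: pkTok rest                                    -- catch-all (.)

def parse_keystrokes_alt (keystrokes : String) : List String :=
  pkTok keystrokes.toList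

-- ===== PRECONDITION & SPEC =====
def Spec_parse_keystrokes (keystrokes : String) (out : List String) : Prop := out = parse_keystrokes_alt keystrokes
instance (keystrokes : String) (out : List String) : Decidable (Spec_parse_keystrokes keystrokes out) := by unfold Spec_parse_keystrokes; infer_instance

-- ===== CLAIM (what is proved, stated in full; the proofs are below) =====
def Claim_equal_parse_keystrokes : Prop := ∀ (keystrokes : String), Dom_parse_keystrokes keystrokes → Spec_parse_keystrokes keystrokes (parse_keystrokes keystrokes)

-- ===== LEMMAS AND PROOFS =====

-- catch-all step of the tokenizer for a character that is neither '^' nor '\\'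
theorem pkTok_other (a : Char) (rest : List Char) (h1 : ¬ a = '^') (h2 : ¬ a = '\\') :
    pkTok (a :: rest) = a.toString :: pkTok rest := by
  cases rest <;> simp [pkTok, h1, h2]

-- A's loop from index i yields keys ++ (B's tokens of the suffix from i).
theorem pkALoop_eq_tok (cs : List Char) (i : Nat) (keys : List String) :
    pkALoop cs i keys = keys ++ pkTok (cs.drop i) := by
  by_cases h : i < cs.length
  · have hdrop : cs.drop i = cs[i] :: cs.drop (i + 1) := List.drop_eq_getElem_cons h
    have hget : cs.getD i ' ' = cs[i] := by
      simp [List.getD_eq_getElem?_getD, List.getElem?_eq_getElem h]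
    rw [pkALoop]
    simp only [h, dif_pos, hget]
    by_cases hc : cs[i] = '^'
    · by_cases h1 : i + 1 < cs.length
      · have hdrop1 : cs.drop (i + 1) = cs[i + 1] :: cs.drop (i + 2) :=
          List.drop_eq_getElem_cons h1
        have hget1 : cs.getD (i + 1) ' ' = cs[i + 1] := by
          simp [List.getD_eq_getElem?_getD, List.getElem?_eq_getElem h1]
        rw [if_pos ⟨hc, h1⟩, hget1, pkALoop_eq_tok cs (i + 2),
          hdrop, hdrop1, pkTok, if_pos hc]
        simp
      · rw [if_neg (by tauto)]
        have hnil : cs.drop (i + 1) = [] := List.drop_eq_nil_of_le (by omega)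
        rw [pkALoop_eq_tok cs (i + 1), hnil, hdrop, hnil, hc]
        simp [pkTok]; rfl
    · rw [if_neg (by tauto)]
      by_cases hb : cs[i] = '\\'
      · rw [if_pos hb]
        by_cases h1 : i + 1 < cs.length
        · have hdrop1 : cs.drop (i + 1) = cs[i + 1] :: cs.drop (i + 2) :=
            List.drop_eq_getElem_cons h1
          have hget1 : cs.getD (i + 1) ' ' = cs[i + 1] := by
            simp [List.getD_eq_getElem?_getD, List.getElem?_eq_getElem h1]
          rw [if_pos h1]
          simp only [hget1]
          rw [pkALoop_eq_tok cs (i + 2), hdrop, hdrop1, pkTok, if_neg hc, if_pos hb]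
          split_ifs <;> simp
        · rw [if_neg h1, pkALoop_eq_tok cs (i + 1)]
          have hnil : cs.drop (i + 1) = [] := List.drop_eq_nil_of_le (by omega)
          rw [hdrop, hnil, hb]
          simp [pkTok]; rfl
      · rw [if_neg hb, pkALoop_eq_tok cs (i + 1), hdrop, pkTok_other _ _ hc hb]
        simp
  · rw [pkALoop]
    simp [h, List.drop_eq_nil_of_le (by omega : cs.length ≤ i), pkTok]
termination_by cs.length - i

-- ===== VERDICT (by name: the statement is the Claim_ definition above) =====
theorem parse_keystrokes_spec : Claim_equal_parse_keystrokes := by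
  intro ks _
  unfold Spec_parse_keystrokes parse_keystrokes parse_keystrokes_alt
  simpa using pkALoop_eq_tok ks.toList 0 []
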